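-- pv_equiv track=rewrite | github.com/devwithmohit/AetherOS-Human-Centric-Voice-AI-Agent | memory-service/app/privacy.py | redact_sensitive_fields
-- ===== SOURCE A (Python) =====
-- from typing import Optional, Any
--
-- def redact_sensitive_fields(
--     data: dict[str, Any], sensitive_fields: list[str]
-- ) -> dict[str, Any]:
--     """Redact sensitive fields from dictionary.
--
--     Args:
--         data: Data dictionary
--         sensitive_fields: List of field names to redact
--
--     Returns:
--         Data with sensitive fields redacted
--     """
--     redacted = data.copy()
--
--     for field in sensitive_fields:
--         if field in redacted:
--             redacted[field] = "[REDACTED]"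
--
--     return redacted
-- ===== SOURCE B (Python) =====
-- def redact_sensitive_fields(data, sensitive_fields):
--     """Redact sensitive fields from dictionary (single pass over data with a membership set)."""
--     sens = set(sensitive_fields)
--     return {key: ("[REDACTED]" if key in sens else value) for key, value in data.items()}
-- ===== Notes on version B (the rewrite author's own statement) =====
-- stated objective: idiomatic
-- what changed: Instead of copying the dict and mutating it while iterating over sensitive_fields with a membership test against the dict, B builds a set from sensitive_fields once and constructs the result in a single dict comprehension over data.items(), testing each key against the set.
import Mathlib
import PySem

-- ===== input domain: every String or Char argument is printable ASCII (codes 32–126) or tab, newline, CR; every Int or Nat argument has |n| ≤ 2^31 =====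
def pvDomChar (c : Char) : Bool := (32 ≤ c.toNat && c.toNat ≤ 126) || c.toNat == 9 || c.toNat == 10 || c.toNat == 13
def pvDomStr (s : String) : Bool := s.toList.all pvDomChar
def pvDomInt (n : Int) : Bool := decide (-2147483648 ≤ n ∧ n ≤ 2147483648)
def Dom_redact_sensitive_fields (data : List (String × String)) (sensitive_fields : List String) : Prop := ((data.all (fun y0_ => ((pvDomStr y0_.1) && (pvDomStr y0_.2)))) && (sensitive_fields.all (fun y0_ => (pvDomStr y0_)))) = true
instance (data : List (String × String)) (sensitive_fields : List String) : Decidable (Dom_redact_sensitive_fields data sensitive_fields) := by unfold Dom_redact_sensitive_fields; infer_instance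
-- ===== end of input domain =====

-- B replaces A's copy-and-mutate loop over sensitive_fields by a set of the sensitive
-- field names and one dict comprehension over data.items() (objective: idiomatic).

-- ===== PORT A =====
-- redacted = data.copy(); for field in sensitive_fields: if field in redacted: redacted[field] = "[REDACTED]"
def redact_sensitive_fields (data : List (String × String)) (sensitive_fields : List String) : List (String × String) :=
  (sensitive_fields.foldl
    (fun red field =>
      if red.contains field then red.insert field "[REDACTED]" else red)
    (PySem.Dict.mk data)).items

-- ===== PORT B =====
-- the comprehension's body: one entry (key, "[REDACTED]" if key in sens else value)
def pvRedactEntry (sens : PySem.Set String) (kv : String × String) : String × String :=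
  match kv with
  | (key, value) => (key, if sens.contains key then "[REDACTED]" else value)

-- the comprehension over data.items(), as its obvious structural recursion
def pvRedactComp (sens : PySem.Set String) : List (String × String) → List (String × String)
  | [] => []
  | kv :: rest => pvRedactEntry sens kv :: pvRedactComp sens rest

-- sens = set(sensitive_fields); {key: "[REDACTED]" if key in sens else value for key, value in data.items()}
def redact_sensitive_fields_alt (data : List (String × String)) (sensitive_fields : List String) : List (String × String) :=
  pvRedactComp (PySem.Set.ofList sensitive_fields) data

-- ===== PRECONDITION & SPEC =====
def Spec_redact_sensitive_fields (data : List (String × String)) (sensitive_fields : List String) (out : List (String × String)) : Prop := out = redact_sensitive_fields_alt data sensitive_fields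
instance (data : List (String × String)) (sensitive_fields : List String) (out : List (String × String)) : Decidable (Spec_redact_sensitive_fields data sensitive_fields out) := by unfold Spec_redact_sensitive_fields; infer_instance

-- ===== CLAIM (what is proved, stated in full; the proofs are below) =====
def Claim_equal_redact_sensitive_fields : Prop := ∀ (data : List (String × String)) (sensitive_fields : List String), Dom_redact_sensitive_fields data sensitive_fields → Spec_redact_sensitive_fields data sensitive_fields (redact_sensitive_fields data sensitive_fields)

-- ===== LEMMAS AND PROOFS =====

-- B's recursion is a map of its entry transformer over data.
theorem pvRedactComp_eq_map (sens : PySem.Set String) (l : List (String × String)) :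
    pvRedactComp sens l = l.map (pvRedactEntry sens) := by
  induction l with
  | nil => rfl
  | cons kv rest ih => simp [pvRedactComp, ih]

-- One body step of A's loop, on items: redact every pair whose key equals `field`.
theorem step_items (d : PySem.Dict String String) (field : String) :
    (if d.contains field then d.insert field "[REDACTED]" else d).items
      = d.items.map (fun p => if p.1 == field then (field, "[REDACTED]") else p) := by
  by_cases h : d.contains field = true
  · rw [if_pos h, PySem.Dict.items_insert_of_contains d _ h]
  · rw [if_neg h]
    have hne : ∀ p ∈ d.items, p.1 ≠ field := by
      intro p hp hpf
      exact h ((PySem.Dict.contains_iff_mem_keys d field).mpr (hpf ▸ PySem.Dict.mem_keys_of_mem_items d hp))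
    conv_lhs => rw [show d.items = d.items.map id from (List.map_id _).symm]
    refine List.map_congr_left ?_
    intro p hp
    simp [beq_iff_eq, hne p hp]

-- A's whole loop, on items: redact every pair whose key occurs in `fields`.
theorem fold_items (fields : List String) (d : PySem.Dict String String) :
    (fields.foldl
      (fun red field => if red.contains field then red.insert field "[REDACTED]" else red) d).items
      = d.items.map (fun p => if fields.contains p.1 then (p.1, "[REDACTED]") else p) := by
  induction fields generalizing d with
  | nil => simp
  | cons f fs ih =>
      rw [List.foldl_cons, ih, step_items, List.map_map]
      refine List.map_congr_left ?_
      intro p _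
      by_cases hpf : p.1 = f
      · subst hpf
        by_cases hfs : fs.contains p.1 = true <;>
          simp [Function.comp, hfs, List.contains_cons]
      · have : (p.1 == f) = false := by simp [hpf]
        by_cases hfs : fs.contains p.1 = true <;>
          simp [Function.comp, this, hfs, List.contains_cons, hpf]

-- ===== VERDICT (by name: the statement is the Claim_ definition above) =====
theorem redact_sensitive_fields_spec : Claim_equal_redact_sensitive_fields := by
  intro data sensitive_fields _
  unfold Spec_redact_sensitive_fields redact_sensitive_fields redact_sensitive_fields_alt
  rw [fold_items, pvRedactComp_eq_map]
  refine List.map_congr_left ?_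
  intro p _
  by_cases h : p.1 ∈ sensitive_fields <;>
    simp [pvRedactEntry, PySem.Set.mem_ofList, h]
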